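-- pv_equiv track=rewrite | github.com/zegameiro/LEI_UA_3ano | 1ºSemestre/IA/Pratica/guiao-de-programacao-funcional-zegameiro/aula1.py | remove_e_conta
-- ===== SOURCE A (Python) =====
-- def remove_e_conta(lista, elem):
-- 	if lista == []:
-- 		return ([], 0)
--
-- 	res = remove_e_conta(lista[0:-1], elem)
--
-- 	if lista[-1] == elem:
-- 		aux = list(res)
-- 		aux[1] += 1
-- 		res = tuple(aux)
-- 	else:
-- 		res[0].append(lista[-1])
--
-- 	return res
-- ===== SOURCE B (Python) =====
-- def remove_e_conta(lista, elem):
--     res = []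
--     count = 0
--     for x in lista:
--         if x == elem:
--             count += 1
--         else:
--             res.append(x)
--     return (res, count)
-- ===== Notes on version B (the rewrite author's own statement) =====
-- stated objective: faster
-- what changed: Replaced the recursion on lista[0:-1] (which copies an O(n) slice at every level, O(n^2) total) with a single left-to-right pass accumulating the kept elements and the removal count.
import Mathlib
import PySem

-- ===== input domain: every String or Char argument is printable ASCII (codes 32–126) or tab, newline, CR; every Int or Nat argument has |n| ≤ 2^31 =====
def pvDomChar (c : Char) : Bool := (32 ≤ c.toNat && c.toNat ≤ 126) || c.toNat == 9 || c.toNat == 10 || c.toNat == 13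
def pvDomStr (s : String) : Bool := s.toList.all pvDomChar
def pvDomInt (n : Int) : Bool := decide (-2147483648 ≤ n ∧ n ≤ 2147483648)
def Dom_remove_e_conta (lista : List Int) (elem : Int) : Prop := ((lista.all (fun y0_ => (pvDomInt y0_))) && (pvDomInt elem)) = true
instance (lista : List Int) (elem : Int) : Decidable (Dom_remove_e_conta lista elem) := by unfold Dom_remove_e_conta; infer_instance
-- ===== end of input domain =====

-- B replaces A's recursion over the sliced prefix (O(n^2) from slice copies) with one linear fold; faster.


-- ===== PORT A =====
-- lista[0:-1] is List.dropLast, lista[-1] on a nonempty list is List.getLast (both exact here).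
def remove_e_conta (lista : List Int) (elem : Int) : List Int × Int :=
  if h : lista = [] then ([], 0)
  else
    let res := remove_e_conta lista.dropLast elem
    if lista.getLast h = elem then (res.1, res.2 + 1)
    else (res.1 ++ [lista.getLast h], res.2)
termination_by lista.length
decreasing_by
  simp only [List.length_dropLast]
  have := List.length_pos_iff.mpr h
  omega

-- ===== PORT B =====
def remove_e_conta_alt (lista : List Int) (elem : Int) : List Int × Int :=
  lista.foldl (fun acc x => if x = elem then (acc.1, acc.2 + 1) else (acc.1 ++ [x], acc.2)) ([], 0)

-- ===== PRECONDITION & SPEC =====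
def Spec_remove_e_conta (lista : List Int) (elem : Int) (out : List Int × Int) : Prop := out = remove_e_conta_alt lista elem
instance (lista : List Int) (elem : Int) (out : List Int × Int) : Decidable (Spec_remove_e_conta lista elem out) := by unfold Spec_remove_e_conta; infer_instance

-- ===== CLAIM (what is proved, stated in full; the proofs are below) =====
def Claim_equal_remove_e_conta : Prop := ∀ (lista : List Int) (elem : Int), Dom_remove_e_conta lista elem → Spec_remove_e_conta lista elem (remove_e_conta lista elem)

-- ===== LEMMAS AND PROOFS =====
theorem remove_e_conta_eq_alt (lista : List Int) (elem : Int) :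
    remove_e_conta lista elem = remove_e_conta_alt lista elem := by
  induction lista using List.reverseRecOn with
  | nil => rw [remove_e_conta]; simp [remove_e_conta_alt]
  | append_singleton xs x ih =>
      rw [remove_e_conta]
      simp only [List.dropLast_concat, List.getLast_append, ih]
      unfold remove_e_conta_alt
      rw [List.foldl_append]
      simp

-- ===== VERDICT (by name: the statement is the Claim_ definition above) =====
theorem remove_e_conta_spec : Claim_equal_remove_e_conta := by
  intro lista elem _
  exact remove_e_conta_eq_alt lista elem
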